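-- pv_equiv track=rewrite | github.com/FlexonaFFt/CodeRunYandex | RunSeason2/backend/440.queens/queens2.py | min_liars
-- ===== SOURCE A (Python) =====
-- from itertools import product
--
-- def min_liars(a, b, c, d):
--     reported_queens = [a, b, c, d]
--     total_queens = 4
--     min_liars = float('inf')
--
--     for distribution in product(range(5), repeat=4):
--         if sum(distribution) == total_queens:
--             liars = sum(1 for reported, actual in zip(reported_queens, distribution) if reported != actual)
--             min_liars = min(min_liars, liars)
--
--     return min_liars
-- ===== SOURCE B (Python) =====
-- def min_liars(a, b, c, d):
--     reported = [a, b, c, d]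
--     best = 4  # empty subset of truth-tellers is always feasible
--     for mask in range(16):
--         kept = [reported[i] for i in range(4) if (mask // 2**i) % 2 == 1]
--         if all(v in range(5) for v in kept):
--             f = sum(kept)
--             r = 4 - len(kept)
--             if f <= 4 and 4 - f <= 4 * r:
--                 best = min(best, r)
--     return best
-- ===== Notes on version B (the rewrite author's own statement) =====
-- stated objective: faster
-- what changed: Instead of enumerating all 625 distributions of 4 queens over the four positions and counting mismatches, B enumerates the 16 subsets of positions kept as truthful, checks feasibility of each subset (reported values in 0..4, sum at most 4, remainder fillable by the lying positions) and minimises 4 minus the subset size.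
import Mathlib
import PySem

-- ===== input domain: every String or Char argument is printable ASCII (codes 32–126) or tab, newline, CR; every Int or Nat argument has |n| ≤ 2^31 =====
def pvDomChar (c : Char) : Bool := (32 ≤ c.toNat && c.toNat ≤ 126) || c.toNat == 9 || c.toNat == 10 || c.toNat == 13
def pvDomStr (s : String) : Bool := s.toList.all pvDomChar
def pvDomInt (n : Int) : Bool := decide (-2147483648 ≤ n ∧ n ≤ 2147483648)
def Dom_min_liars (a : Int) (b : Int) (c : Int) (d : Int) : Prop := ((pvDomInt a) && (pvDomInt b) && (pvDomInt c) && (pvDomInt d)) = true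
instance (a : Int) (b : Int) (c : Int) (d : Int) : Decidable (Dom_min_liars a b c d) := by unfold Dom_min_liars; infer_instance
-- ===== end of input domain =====

-- B enumerates the 16 subsets of positions kept as truthful instead of all 625 distributions
-- of 4 queens over 4 positions (objective: faster, by a smaller enumeration).

-- ===== PORT A =====
-- Python's float('inf') initial accumulator is modelled as `none`; the loop always reaches a
-- distribution summing to 4, so the final `Option.getD 0` default is never the returned value.
def min_liars (a : Int) (b : Int) (c : Int) (d : Int) : Int :=
  let reported := [a, b, c, d]
  let res : Option Int :=
    (PySem.List.pyRange 0 5 1).foldl (fun m1 x1 =>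
      (PySem.List.pyRange 0 5 1).foldl (fun m2 x2 =>
        (PySem.List.pyRange 0 5 1).foldl (fun m3 x3 =>
          (PySem.List.pyRange 0 5 1).foldl (fun m4 x4 =>
            if x1 + x2 + x3 + x4 = 4 then
              let liars := (reported.zip [x1, x2, x3, x4]).foldl
                (fun acc p => if p.1 ≠ p.2 then acc + 1 else acc) (0 : Int)
              some (match m4 with | none => liars | some m => min m liars)
            else m4) m3) m2) m1) none
  res.getD 0

-- ===== PORT B =====
def min_liars_alt (a : Int) (b : Int) (c : Int) (d : Int) : Int :=
  let reported := [a, b, c, d]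
  (PySem.List.pyRange 0 16 1).foldl (fun best mask =>
    let kept := ((PySem.List.pyRange 0 4 1).filter
        (fun i => PySem.Int.mod (PySem.Int.floordiv mask (2 ^ i.toNat)) 2 == 1)).map
      (fun i => PySem.List.pyGetD reported i 0)
    if kept.all (fun v => decide (0 ≤ v) && decide (v < 5)) then
      let f := kept.sum
      let r : Int := 4 - kept.length
      if f ≤ 4 ∧ 4 - f ≤ 4 * r then min best r else best
    else best) 4

-- ===== PRECONDITION & SPEC =====
def Spec_min_liars (a : Int) (b : Int) (c : Int) (d : Int) (out : Int) : Prop := out = min_liars_alt a b c d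
instance (a : Int) (b : Int) (c : Int) (d : Int) (out : Int) : Decidable (Spec_min_liars a b c d out) := by unfold Spec_min_liars; infer_instance

-- ===== CLAIM (what is proved, stated in full; the proofs are below) =====
def Claim_equal_min_liars : Prop := ∀ (a : Int) (b : Int) (c : Int) (d : Int), Dom_min_liars a b c d → Spec_min_liars a b c d (min_liars a b c d)

-- ===== LEMMAS AND PROOFS =====

-- Any reported value outside 0..4 behaves, in both programs, exactly like the value 5:
-- it mismatches every distribution entry (A) and fails the range test (B).
def pvClamp (v : Int) : Int := if 0 ≤ v ∧ v ≤ 4 then v else 5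

theorem pvClamp_mem (v : Int) : pvClamp v ∈ ([0, 1, 2, 3, 4, 5] : List Int) := by
  unfold pvClamp
  split_ifs with h
  · simp only [List.mem_cons, List.not_mem_nil, or_false]
    omega
  · simp

theorem pvClamp_step (a x : Int) (h0 : 0 ≤ x) (h5 : x < 5) (acc : Int) :
    (if pvClamp a ≠ x then acc + 1 else acc) = (if a ≠ x then acc + 1 else acc) := by
  unfold pvClamp
  split_ifs <;> omega

theorem pvLiars_clamp (a b c d x1 x2 x3 x4 : Int)
    (h1 : 0 ≤ x1 ∧ x1 < 5) (h2 : 0 ≤ x2 ∧ x2 < 5) (h3 : 0 ≤ x3 ∧ x3 < 5) (h4 : 0 ≤ x4 ∧ x4 < 5) :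
    (([pvClamp a, pvClamp b, pvClamp c, pvClamp d].zip [x1, x2, x3, x4]).foldl
      (fun acc p => if p.1 ≠ p.2 then acc + 1 else acc) (0 : Int))
    = (([a, b, c, d].zip [x1, x2, x3, x4]).foldl
      (fun acc p => if p.1 ≠ p.2 then acc + 1 else acc) (0 : Int)) := by
  simp only [List.zip, List.zipWith, List.foldl]
  rw [pvClamp_step a x1 h1.1 h1.2, pvClamp_step b x2 h2.1 h2.2,
      pvClamp_step c x3 h3.1 h3.2, pvClamp_step d x4 h4.1 h4.2]

set_option maxRecDepth 40000 in
theorem min_liars_clamp (a b c d : Int) :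
    min_liars (pvClamp a) (pvClamp b) (pvClamp c) (pvClamp d) = min_liars a b c d := by
  simp only [min_liars]
  apply congrArg (fun o : Option Int => o.getD 0)
  apply PySem.List.foldl_congr_mem
  intro m1 x1 hx1
  apply PySem.List.foldl_congr_mem
  intro m2 x2 hx2
  apply PySem.List.foldl_congr_mem
  intro m3 x3 hx3
  apply PySem.List.foldl_congr_mem
  intro m4 x4 hx4
  rw [PySem.List.mem_pyRange_one] at hx1 hx2 hx3 hx4
  by_cases hs : x1 + x2 + x3 + x4 = 4
  · simp only [hs, if_pos]
    rw [pvLiars_clamp a b c d x1 x2 x3 x4 hx1 hx2 hx3 hx4]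
  · simp only [hs, if_false]

theorem pvClamp_range (v : Int) :
    (decide (0 ≤ pvClamp v) && decide (pvClamp v < 5)) = (decide (0 ≤ v) && decide (v < 5)) := by
  unfold pvClamp
  by_cases h : 0 ≤ v ∧ v ≤ 4 <;> simp [h]; omega

theorem min_liars_alt_clamp (a b c d : Int) :
    min_liars_alt (pvClamp a) (pvClamp b) (pvClamp c) (pvClamp d) = min_liars_alt a b c d := by
  simp only [min_liars_alt]
  apply PySem.List.foldl_congr_mem
  intro best mask _
  have hmap : ([pvClamp a, pvClamp b, pvClamp c, pvClamp d] : List Int)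
      = [a, b, c, d].map pvClamp := by simp
  have hget : ∀ i ∈ (PySem.List.pyRange 0 4 1).filter
      (fun i => PySem.Int.mod (PySem.Int.floordiv mask (2 ^ i.toNat)) 2 == 1),
      PySem.List.pyGetD ([pvClamp a, pvClamp b, pvClamp c, pvClamp d] : List Int) i 0
        = pvClamp (PySem.List.pyGetD ([a, b, c, d] : List Int) i 0) := by
    intro i hi
    have hmem := List.mem_of_mem_filter hi
    rw [PySem.List.mem_pyRange_one] at hmem
    obtain ⟨hm1, hm2⟩ := hmem
    interval_cases i <;> simp [PySem.List.pyGetD, PySem.List.pyIdx?, PySem.List.pyGet?]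
  rw [List.map_congr_left hget]
  set kept := ((PySem.List.pyRange 0 4 1).filter
      (fun i => PySem.Int.mod (PySem.Int.floordiv mask (2 ^ i.toNat)) 2 == 1)).map
    (fun i => PySem.List.pyGetD ([a, b, c, d] : List Int) i 0) with hk
  rw [show (((PySem.List.pyRange 0 4 1).filter
      (fun i => PySem.Int.mod (PySem.Int.floordiv mask (2 ^ i.toNat)) 2 == 1)).map
      (fun i => pvClamp (PySem.List.pyGetD ([a, b, c, d] : List Int) i 0))) = kept.map pvClamp by
    rw [hk, List.map_map]; rfl]
  have hall : (kept.map pvClamp).all (fun v => decide (0 ≤ v) && decide (v < 5))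
      = kept.all (fun v => decide (0 ≤ v) && decide (v < 5)) := by
    rw [List.all_map]
    apply List.all_congr rfl
    intro v
    exact pvClamp_range v
  rw [hall]
  by_cases hc : kept.all (fun v => decide (0 ≤ v) && decide (v < 5)) = true
  · simp only [hc, if_pos]
    have hsum : (kept.map pvClamp) = kept := by
      have : ∀ v ∈ kept, pvClamp v = v := by
        intro v hv
        have := List.all_eq_true.mp hc v hv
        simp only [Bool.and_eq_true, decide_eq_true_eq] at this
        unfold pvClamp
        rw [if_pos]
        omega
      rw [List.map_congr_left this, List.map_id']
    rw [hsum]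
  · simp only [hc]
    simp

set_option maxRecDepth 40000 in
set_option maxHeartbeats 4000000 in
theorem pv_part0 : ∀ b ∈ ([0,1,2,3,4,5] : List Int), ∀ c ∈ ([0,1,2,3,4,5] : List Int),
    ∀ d ∈ ([0,1,2,3,4,5] : List Int), min_liars 0 b c d = min_liars_alt 0 b c d := by decide

set_option maxRecDepth 40000 in
set_option maxHeartbeats 4000000 in
theorem pv_part1 : ∀ b ∈ ([0,1,2,3,4,5] : List Int), ∀ c ∈ ([0,1,2,3,4,5] : List Int),
    ∀ d ∈ ([0,1,2,3,4,5] : List Int), min_liars 1 b c d = min_liars_alt 1 b c d := by decide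

set_option maxRecDepth 40000 in
set_option maxHeartbeats 4000000 in
theorem pv_part2 : ∀ b ∈ ([0,1,2,3,4,5] : List Int), ∀ c ∈ ([0,1,2,3,4,5] : List Int),
    ∀ d ∈ ([0,1,2,3,4,5] : List Int), min_liars 2 b c d = min_liars_alt 2 b c d := by decide

set_option maxRecDepth 40000 in
set_option maxHeartbeats 4000000 in
theorem pv_part3 : ∀ b ∈ ([0,1,2,3,4,5] : List Int), ∀ c ∈ ([0,1,2,3,4,5] : List Int),
    ∀ d ∈ ([0,1,2,3,4,5] : List Int), min_liars 3 b c d = min_liars_alt 3 b c d := by decide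

set_option maxRecDepth 40000 in
set_option maxHeartbeats 4000000 in
theorem pv_part4 : ∀ b ∈ ([0,1,2,3,4,5] : List Int), ∀ c ∈ ([0,1,2,3,4,5] : List Int),
    ∀ d ∈ ([0,1,2,3,4,5] : List Int), min_liars 4 b c d = min_liars_alt 4 b c d := by decide

set_option maxRecDepth 40000 in
set_option maxHeartbeats 4000000 in
theorem pv_part5 : ∀ b ∈ ([0,1,2,3,4,5] : List Int), ∀ c ∈ ([0,1,2,3,4,5] : List Int),
    ∀ d ∈ ([0,1,2,3,4,5] : List Int), min_liars 5 b c d = min_liars_alt 5 b c d := by decide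

theorem pv_main (a b c d : Int)
    (ha : a ∈ ([0,1,2,3,4,5] : List Int)) (hb : b ∈ ([0,1,2,3,4,5] : List Int))
    (hc : c ∈ ([0,1,2,3,4,5] : List Int)) (hd : d ∈ ([0,1,2,3,4,5] : List Int)) :
    min_liars a b c d = min_liars_alt a b c d := by
  simp only [List.mem_cons, List.not_mem_nil, or_false] at ha
  rcases ha with rfl | rfl | rfl | rfl | rfl | rfl
  · exact pv_part0 b hb c hc d hd
  · exact pv_part1 b hb c hc d hd
  · exact pv_part2 b hb c hc d hd
  · exact pv_part3 b hb c hc d hd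
  · exact pv_part4 b hb c hc d hd
  · exact pv_part5 b hb c hc d hd

-- ===== VERDICT (by name: the statement is the Claim_ definition above) =====
theorem min_liars_spec : Claim_equal_min_liars := by
  intro a b c d _
  unfold Spec_min_liars
  rw [← min_liars_clamp a b c d, ← min_liars_alt_clamp a b c d]
  exact pv_main _ _ _ _ (pvClamp_mem a) (pvClamp_mem b) (pvClamp_mem c) (pvClamp_mem d)
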